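-- pv_equiv track=rewrite | github.com/Ezlearner06/SimplexSolver | input/json_parser.py | _find_key
-- ===== SOURCE A (Python) =====
-- def _find_key(data: dict, aliases: list, required: bool = True, context: str = "") -> str | None:
--     """Find the first matching key in the dict from a list of aliases (case-insensitive)."""
--     data_keys_lower = {k.lower(): k for k in data.keys()}
--     for alias in aliases:
--         if alias.lower() in data_keys_lower:
--             return data_keys_lower[alias.lower()]
--     if required:
--         raise ValueError(
--             f"Missing required key for {context}. "
--             f"Accepted keys: {', '.join(aliases[:5])}"
--         )
--     return None
-- ===== SOURCE B (Python) =====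
-- def _find_key(data: dict, aliases: list, required: bool = True, context: str = "") -> str | None:
--     """Find the dict key matching the earliest alias, case-insensitively.
--
--     Rank each lowercase alias by its first position, then pick the key whose
--     lowercase form has the lowest rank, in a single pass over the dict."""
--     rank = {}
--     for i, alias in enumerate(aliases):
--         rank.setdefault(alias.lower(), i)
--     n = len(aliases)
--     best_key, best_rank = None, n
--     for k in data:
--         r = rank.get(k.lower(), n)
--         if r < best_rank:
--             best_key, best_rank = k, r
--     if best_key is not None:
--         return best_key
--     if required:
--         raise ValueError(
--             f"Missing required key for {context}. "
--             f"Accepted keys: {', '.join(aliases[:5])}"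
--         )
--     return None
-- ===== Notes on version B (the rewrite author's own statement) =====
-- stated objective: alternative
-- what changed: B inverts the traversal: instead of building a lowercase->key map and probing it per alias, it ranks each lowercase alias by first position and makes one argmin pass over the dict keys; Pre_ excludes dicts with two keys equal after lowercasing (A's last-wins dict-comprehension choice there is accidental, B picks the first) and required=True inputs with no match (both raise ValueError).
-- outside the precondition, e.g. on _find_key({'A': '1', 'a': '2'}, ['a'], True, 'ctx'): A returns 'a', B returns 'A'
import Mathlib
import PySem

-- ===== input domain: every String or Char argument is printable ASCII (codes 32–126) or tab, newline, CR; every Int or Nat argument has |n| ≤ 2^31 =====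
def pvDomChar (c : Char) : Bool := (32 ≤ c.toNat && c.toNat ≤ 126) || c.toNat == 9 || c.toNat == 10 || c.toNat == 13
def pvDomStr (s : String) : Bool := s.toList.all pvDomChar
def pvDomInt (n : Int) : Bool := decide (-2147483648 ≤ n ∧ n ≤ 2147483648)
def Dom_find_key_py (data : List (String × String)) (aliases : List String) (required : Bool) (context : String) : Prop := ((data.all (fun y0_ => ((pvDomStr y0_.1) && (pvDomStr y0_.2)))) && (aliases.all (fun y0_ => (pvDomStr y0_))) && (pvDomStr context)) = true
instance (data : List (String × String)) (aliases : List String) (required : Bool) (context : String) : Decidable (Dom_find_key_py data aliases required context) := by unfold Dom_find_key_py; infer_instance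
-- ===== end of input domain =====

-- B inverts the traversal: rank each lowercase alias by first position, then one argmin
-- pass over the dict keys, instead of A's lowercase->key map probed per alias (alternative).

-- ===== PORT A =====
-- data_keys_lower = {k.lower(): k for k in data.keys()}
def pvA_lowerMap (data : List (String × String)) : PySem.Dict String String :=
  data.foldl (fun m p => m.insert (PySem.Str.lower p.1) p.1) PySem.Dict.empty

-- for alias in aliases: if alias.lower() in data_keys_lower: return data_keys_lower[alias.lower()]
def pvA_loop (d : PySem.Dict String String) : List String → Option String
  | [] => none
  | a :: rest =>
    match d.get? (PySem.Str.lower a) with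
    | some k => some k
    | none => pvA_loop d rest

def find_key_py (data : List (String × String)) (aliases : List String) (required : Bool) (context : String) : Option String :=
  match pvA_loop (pvA_lowerMap data) aliases with
  | some k => some k
  | none => none   -- if required, Python raises ValueError here: excluded by Pre_find_key_py

-- ===== PORT B =====
-- for i, alias in enumerate(aliases): rank.setdefault(alias.lower(), i)
-- (setdefault ported by hand, exact: insert only when the key is absent)
def pvB_rankAux : List String → Nat → PySem.Dict String Nat → PySem.Dict String Nat
  | [], _, d => d
  | a :: rest, i, d =>
    pvB_rankAux rest (i + 1)
      (if (d.get? (PySem.Str.lower a)).isNone then d.insert (PySem.Str.lower a) i else d)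

def pvB_rank (aliases : List String) : PySem.Dict String Nat :=
  pvB_rankAux aliases 0 PySem.Dict.empty

-- for k in data: r = rank.get(k.lower(), n); if r < best_rank: best_key, best_rank = k, r
def pvB_scan (rank : PySem.Dict String Nat) (n : Nat) (data : List (String × String)) :
    Option String × Nat :=
  data.foldl
    (fun st p =>
      let r := rank.getD (PySem.Str.lower p.1) n
      if r < st.2 then (some p.1, r) else st)
    (none, n)

def find_key_py_alt (data : List (String × String)) (aliases : List String) (required : Bool) (context : String) : Option String :=
  match (pvB_scan (pvB_rank aliases) aliases.length data).1 with
  | some k => some k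
  | none => none   -- if required, B raises ValueError here: excluded by Pre_find_key_py

-- ===== PRECONDITION & SPEC =====
-- Pre_ excludes (a) dicts containing two keys equal after lowercasing — there A's last-wins
-- dict-comprehension choice is accidental and B picks the first match — and (b) required=True
-- inputs with no case-insensitive match, where both Pythons raise ValueError.
def Pre_find_key_py (data : List (String × String)) (aliases : List String) (required : Bool) (context : String) : Prop :=
  (data.map (fun p => PySem.Str.lower p.1)).Nodup ∧
  (required = true → ∃ a ∈ aliases, ∃ p ∈ data, PySem.Str.lower p.1 = PySem.Str.lower a)

instance (data : List (String × String)) (aliases : List String) (required : Bool) (context : String) : Decidable (Pre_find_key_py data aliases required context) := by unfold Pre_find_key_py; infer_instance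

def pvWitness_find_key_py : (List (String × String)) × List String × Bool × String :=
  ([("Key", "1")], ["key"], true, "ctx")

def Spec_find_key_py (data : List (String × String)) (aliases : List String) (required : Bool) (context : String) (out : Option String) : Prop := out = find_key_py_alt data aliases required context
instance (data : List (String × String)) (aliases : List String) (required : Bool) (context : String) (out : Option String) : Decidable (Spec_find_key_py data aliases required context out) := by unfold Spec_find_key_py; infer_instance

-- ===== CLAIM =====
def Claim_equal_find_key_py : Prop := ∀ (data : List (String × String)) (aliases : List String) (required : Bool) (context : String), Dom_find_key_py data aliases required context → Pre_find_key_py data aliases required context → Spec_find_key_py data aliases required context (find_key_py data aliases required context)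

-- ===== LEMMAS AND PROOFS =====

-- A's map lookup is the last matching key of data
def pvLastMatch (a : String) (data : List (String × String)) : Option String :=
  data.foldl (fun found p => if PySem.Str.lower p.1 == PySem.Str.lower a then some p.1 else found) none

theorem lowerMap_get_eq_lastMatch (data : List (String × String)) (a : String) :
    (pvA_lowerMap data).get? (PySem.Str.lower a) = pvLastMatch a data := by
  unfold pvA_lowerMap pvLastMatch
  suffices h : ∀ (m : PySem.Dict String String) (acc : Option String),
      m.get? (PySem.Str.lower a) = acc →
      (data.foldl (fun m p => m.insert (PySem.Str.lower p.1) p.1) m).get? (PySem.Str.lower a)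
        = data.foldl (fun found p => if PySem.Str.lower p.1 == PySem.Str.lower a then some p.1 else found) acc by
    exact h PySem.Dict.empty none (by simp [PySem.Dict.get?_empty])
  induction data with
  | nil => intro m acc h; simpa using h
  | cons p rest ih =>
    intro m acc h
    simp only [List.foldl_cons]
    apply ih
    rw [PySem.Dict.get?_insert]
    by_cases he : PySem.Str.lower a = PySem.Str.lower p.1
    · simp [he]
    · simp [he, h, beq_iff_eq, Ne.symm he]

theorem lastMatch_keep (a : String) (data : List (String × String)) (acc : Option String)
    (h : ∀ p ∈ data, PySem.Str.lower p.1 ≠ PySem.Str.lower a) :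
    data.foldl (fun found p => if PySem.Str.lower p.1 == PySem.Str.lower a then some p.1 else found) acc = acc := by
  induction data generalizing acc with
  | nil => rfl
  | cons q rest ih =>
    simp only [List.foldl_cons]
    rw [if_neg (by simpa using h q (by simp)), ih _ (fun p hp => h p (by simp [hp]))]

theorem lastMatch_eq_find (a : String) (data : List (String × String))
    (hnd : (data.map (fun p => PySem.Str.lower p.1)).Nodup) :
    pvLastMatch a data
      = (data.find? (fun p => PySem.Str.lower p.1 == PySem.Str.lower a)).map Prod.fst := by
  induction data with
  | nil => rfl
  | cons q rest ih =>
    rw [List.map_cons, List.nodup_cons] at hnd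
    by_cases hq : PySem.Str.lower q.1 = PySem.Str.lower a
    · have hstep : pvLastMatch a (q :: rest)
          = rest.foldl (fun found p => if PySem.Str.lower p.1 == PySem.Str.lower a then some p.1 else found) (some q.1) := by
        unfold pvLastMatch
        simp [List.foldl_cons, hq]
      rw [hstep, lastMatch_keep a rest (some q.1)
        (fun p hp hpa => hnd.1 (List.mem_map.mpr ⟨p, hp, hpa.trans hq.symm⟩))]
      rw [List.find?_cons_of_pos (by simpa using hq)]
      rfl
    · have hstep : pvLastMatch a (q :: rest) = pvLastMatch a rest := by
        unfold pvLastMatch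
        simp [List.foldl_cons, hq]
      rw [hstep, List.find?_cons_of_neg (by simpa using hq)]
      exact ih hnd.2

-- proof-side spec of the rank dict: first index of s among the lowered aliases
def pvIdxOf? (s : String) : List String → Option Nat
  | [] => none
  | a :: rest => if s = PySem.Str.lower a then some 0 else (pvIdxOf? s rest).map (· + 1)

theorem rankAux_get (al : List String) (i : Nat) (d : PySem.Dict String Nat) (s : String) :
    (pvB_rankAux al i d).get? s = (d.get? s).or ((pvIdxOf? s al).map (· + i)) := by
  induction al generalizing i d with
  | nil => cases hd : d.get? s <;> simp [pvB_rankAux, pvIdxOf?, hd, Option.or]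
  | cons a rest ih =>
    show (pvB_rankAux rest (i + 1) _).get? s = _
    rw [ih]
    by_cases hs : s = PySem.Str.lower a
    · rw [hs]
      cases hd : d.get? (PySem.Str.lower a) with
      | some v => simp [hd, pvIdxOf?, Option.or]
      | none => simp [PySem.Dict.get?_insert, pvIdxOf?, Option.or]
    · have h1 : (if (d.get? (PySem.Str.lower a)).isNone then d.insert (PySem.Str.lower a) i else d).get? s
          = d.get? s := by
        split
        · rw [PySem.Dict.get?_insert]; simp [hs]
        · rfl
      rw [h1]
      simp only [pvIdxOf?, if_neg hs]
      cases d.get? s <;> cases pvIdxOf? s rest <;> simp [Option.or] <;> omega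

-- the rank used by the scan, as a function of the key
def pvRk (al : List String) (p : String × String) : Nat :=
  (pvB_rank al).getD (PySem.Str.lower p.1) al.length

theorem rk_eq (al : List String) (p : String × String) :
    pvRk al p = ((pvIdxOf? (PySem.Str.lower p.1) al).map id).getD al.length := by
  unfold pvRk pvB_rank
  rw [PySem.Dict.getD_eq_get?_getD, rankAux_get]
  simp only [PySem.Dict.get?_empty, Option.none_or]
  cases pvIdxOf? (PySem.Str.lower p.1) al <;> simp

theorem rk_cons (a : String) (al : List String) (p : String × String) :
    pvRk (a :: al) p
      = if PySem.Str.lower p.1 = PySem.Str.lower a then 0 else pvRk al p + 1 := by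
  rw [rk_eq, rk_eq]
  simp only [pvIdxOf?, List.length_cons]
  by_cases hs : PySem.Str.lower p.1 = PySem.Str.lower a
  · simp [hs]
  · rw [if_neg hs, if_neg hs]
    cases pvIdxOf? (PySem.Str.lower p.1) al <;> simp

-- the scan body rewritten through pvRk
theorem scan_eq_rkfold (al : List String) (data : List (String × String))
    (st : Option String × Nat) :
    data.foldl
      (fun st p =>
        let r := (pvB_rank al).getD (PySem.Str.lower p.1) al.length
        if r < st.2 then (some p.1, r) else st) st
    = data.foldl (fun st p => if pvRk al p < st.2 then (some p.1, pvRk al p) else st) st := rfl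

-- one step of the scan
theorem scan_cons (al : List String) (q : String × String) (rest : List (String × String))
    (b : Option String) (r : Nat) :
    (q :: rest).foldl (fun st p => if pvRk al p < st.2 then (some p.1, pvRk al p) else st) (b, r)
      = rest.foldl (fun st p => if pvRk al p < st.2 then (some p.1, pvRk al p) else st)
          (if pvRk al q < r then (some q.1, pvRk al q) else (b, r)) := rfl

-- no update when the threshold is below every rank
theorem scan_keep (al : List String) (data : List (String × String))
    (b : Option String) (r : Nat) (h : ∀ p ∈ data, r ≤ pvRk al p) :
    data.foldl (fun st p => if pvRk al p < st.2 then (some p.1, pvRk al p) else st) (b, r) = (b, r) := by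
  induction data with
  | nil => rfl
  | cons q rest ih =>
    rw [scan_cons, if_neg (by have := h q (by simp); omega)]
    exact ih (fun p hp => h p (by simp [hp]))

-- a zero-rank element exists: the scan returns the first one
theorem scan_zero (al : List String) (data : List (String × String))
    (b : Option String) (r : Nat) (hr : 0 < r)
    (hex : ∃ p ∈ data, pvRk al p = 0) :
    (data.foldl (fun st p => if pvRk al p < st.2 then (some p.1, pvRk al p) else st) (b, r)).1
      = (data.find? (fun p => pvRk al p == 0)).map Prod.fst := by
  induction data generalizing b r with
  | nil => simp at hex
  | cons q rest ih =>
    by_cases hq : pvRk al q = 0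
    · rw [scan_cons, if_pos (by omega), hq,
        scan_keep al rest (some q.1) 0 (fun p _ => Nat.zero_le _),
        List.find?_cons_of_pos (by simpa using hq)]
      rfl
    · have hex' : ∃ p ∈ rest, pvRk al p = 0 := by
        rcases hex with ⟨p, hp, h0⟩
        rcases List.mem_cons.mp hp with h | h
        · exact absurd (h ▸ h0) hq
        · exact ⟨p, h, h0⟩
      rw [scan_cons, List.find?_cons_of_neg (by simpa using hq)]
      by_cases hlt : pvRk al q < r
      · rw [if_pos hlt]
        exact ih _ _ (Nat.pos_of_ne_zero hq) hex'
      · rw [if_neg hlt]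
        exact ih _ _ hr hex'

-- removing the head alias when no data key matches it: every rank shifts by one
theorem scan_shift (a : String) (al : List String) (data : List (String × String))
    (hno : ∀ p ∈ data, PySem.Str.lower p.1 ≠ PySem.Str.lower a)
    (b : Option String) (r : Nat) :
    data.foldl (fun st p => if pvRk (a :: al) p < st.2 then (some p.1, pvRk (a :: al) p) else st) (b, r + 1)
      = ((data.foldl (fun st p => if pvRk al p < st.2 then (some p.1, pvRk al p) else st) (b, r)).1,
         (data.foldl (fun st p => if pvRk al p < st.2 then (some p.1, pvRk al p) else st) (b, r)).2 + 1) := by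
  induction data generalizing b r with
  | nil => rfl
  | cons q rest ih =>
    rw [scan_cons, scan_cons, rk_cons, if_neg (hno q (by simp))]
    by_cases hlt : pvRk al q < r
    · rw [if_pos (by omega), if_pos hlt]
      exact ih (fun p hp => hno p (by simp [hp])) _ _
    · rw [if_neg (by omega), if_neg hlt]
      exact ih (fun p hp => hno p (by simp [hp])) _ _

-- find? only depends on the pointwise behaviour of its predicate on the list
theorem find?_congr' {α : Type} (l : List α) (p q : α → Bool) (h : ∀ x ∈ l, p x = q x) :
    l.find? p = l.find? q := by
  induction l with
  | nil => rfl
  | cons x rest ih =>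
    rw [List.find?_cons, List.find?_cons, h x (by simp)]
    cases q x
    · exact ih (fun y hy => h y (by simp [hy]))
    · rfl

-- the core equality: A's alias loop equals B's scan
theorem loops_eq (data : List (String × String)) (al : List String)
    (hnd : (data.map (fun p => PySem.Str.lower p.1)).Nodup) :
    pvA_loop (pvA_lowerMap data) al = (pvB_scan (pvB_rank al) al.length data).1 := by
  induction al with
  | nil =>
    unfold pvB_scan
    rw [scan_eq_rkfold]
    simp only [List.length_nil]
    rw [scan_keep [] data none 0 (fun p _ => Nat.zero_le _)]
    rfl
  | cons a rest ih =>
    unfold pvB_scan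
    rw [scan_eq_rkfold]
    show (match (pvA_lowerMap data).get? (PySem.Str.lower a) with
      | some k => some k | none => pvA_loop (pvA_lowerMap data) rest) = _
    rw [lowerMap_get_eq_lastMatch, lastMatch_eq_find a data hnd]
    by_cases hex : ∃ p ∈ data, PySem.Str.lower p.1 = PySem.Str.lower a
    · have hex0 : ∃ p ∈ data, pvRk (a :: rest) p = 0 := by
        rcases hex with ⟨p, hp, he⟩
        exact ⟨p, hp, by rw [rk_cons, if_pos he]⟩
      rw [scan_zero (a :: rest) data none (a :: rest).length (by simp) hex0]
      rw [find?_congr' data (fun p => pvRk (a :: rest) p == 0)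
        (fun p => PySem.Str.lower p.1 == PySem.Str.lower a) ?_]
      · rcases hex with ⟨p, hp, he⟩
        have hs : (data.find? (fun p => PySem.Str.lower p.1 == PySem.Str.lower a)).isSome := by
          rw [List.find?_isSome]
          exact ⟨p, hp, by simpa using he⟩
        rcases Option.isSome_iff_exists.mp hs with ⟨q, hq⟩
        simp [hq]
      · intro p _
        by_cases h : PySem.Str.lower p.1 = PySem.Str.lower a <;> simp [rk_cons, h]
    · push_neg at hex
      have hfn : data.find? (fun p => PySem.Str.lower p.1 == PySem.Str.lower a) = none := by
        rw [List.find?_eq_none]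
        intro p hp
        simpa using hex p hp
      rw [hfn]
      show pvA_loop (pvA_lowerMap data) rest = _
      rw [ih]
      unfold pvB_scan
      rw [scan_eq_rkfold]
      show _ = (data.foldl (fun st p => if pvRk (a :: rest) p < st.2 then (some p.1, pvRk (a :: rest) p) else st) (none, rest.length + 1)).1
      rw [scan_shift a rest data hex none rest.length]

-- ===== VERDICT =====
theorem find_key_py_spec : Claim_equal_find_key_py := by
  intro data aliases required context _dom hpre
  unfold Spec_find_key_py find_key_py find_key_py_alt
  rw [loops_eq data aliases hpre.1]
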